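-- pv_equiv track=rewrite | github.com/mikaebal/core-problem-set-recursion | part-2.py | digit_match
-- ===== SOURCE A (Python) =====
-- def digit_match(digit_1, digit_2):
--     if digit_1 == 0 and digit_2 == 0:
--         return 1
--
--     if digit_1 == 0 or digit_2 == 0:
--         return 0
--
--     count = 1 if (digit_1 % 10 == digit_2 % 10) else 0
--
--     if digit_1 < 10 or digit_2 < 10:
--         return count
--
--     return count + digit_match(digit_1 // 10, digit_2 // 10)
-- ===== SOURCE B (Python) =====
-- def digit_match(digit_1, digit_2):
--     if digit_1 == 0 and digit_2 == 0:
--         return 1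
--     if digit_1 == 0 or digit_2 == 0:
--         return 0
--     total = 0
--     while True:
--         if digit_1 % 10 == digit_2 % 10:
--             total += 1
--         if digit_1 < 10 or digit_2 < 10:
--             return total
--         digit_1 //= 10
--         digit_2 //= 10
-- ===== Notes on version B (the rewrite author's own statement) =====
-- stated objective: alternative
-- what changed: Replaced the non-tail recursion with an iterative while-True loop carrying an explicit accumulator, with the two zero base-cases kept up front.
import Mathlib
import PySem

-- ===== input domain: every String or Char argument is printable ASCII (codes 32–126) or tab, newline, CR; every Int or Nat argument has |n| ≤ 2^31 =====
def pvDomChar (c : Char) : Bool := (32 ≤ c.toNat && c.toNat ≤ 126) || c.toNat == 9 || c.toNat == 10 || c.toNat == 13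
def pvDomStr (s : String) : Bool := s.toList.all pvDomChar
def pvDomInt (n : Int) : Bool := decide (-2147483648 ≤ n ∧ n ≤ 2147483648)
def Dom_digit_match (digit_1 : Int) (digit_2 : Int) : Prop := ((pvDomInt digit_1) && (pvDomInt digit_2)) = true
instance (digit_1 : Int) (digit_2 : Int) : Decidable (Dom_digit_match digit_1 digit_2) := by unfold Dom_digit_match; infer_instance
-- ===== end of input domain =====

-- B replaces A's non-tail recursion by an iterative accumulator loop (same per-digit work); objective: alternative decomposition.

theorem pvFloordiv10_pos (d : Int) (h : ¬ d < 10) :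
    1 ≤ PySem.Int.floordiv d 10 := by
  rw [PySem.Int.floordiv_eq_ediv_of_pos (by omega : (0:Int) < 10)]
  have := Int.le_ediv_iff_mul_le (a := (1:Int)) (b := d) (c := 10) (by omega)
  omega

theorem pvFloordiv10_toNat_lt (d : Int) (h : ¬ d < 10) :
    (PySem.Int.floordiv d 10).toNat < d.toNat := by
  have h1 := pvFloordiv10_pos d h
  rw [PySem.Int.floordiv_eq_ediv_of_pos (by omega : (0:Int) < 10)] at h1 ⊢
  have h2 : d / 10 * 10 ≤ d :=
    (Int.le_ediv_iff_mul_le (by omega : (0:Int) < 10)).mp (le_refl _)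
  omega

-- ===== PORT A =====
def digit_match (digit_1 : Int) (digit_2 : Int) : Int :=
  if digit_1 = 0 ∧ digit_2 = 0 then 1
  else if digit_1 = 0 ∨ digit_2 = 0 then 0
  else
    let count : Int := if PySem.Int.mod digit_1 10 = PySem.Int.mod digit_2 10 then 1 else 0
    if _h : digit_1 < 10 ∨ digit_2 < 10 then count
    else count + digit_match (PySem.Int.floordiv digit_1 10) (PySem.Int.floordiv digit_2 10)
termination_by digit_1.toNat
decreasing_by exact pvFloordiv10_toNat_lt digit_1 (by tauto)

-- ===== PORT B =====
-- the while-True loop of Source B, state = (digit_1, digit_2, total)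
def digitMatchLoop (digit_1 : Int) (digit_2 : Int) (total : Int) : Int :=
  let total := if PySem.Int.mod digit_1 10 = PySem.Int.mod digit_2 10 then total + 1 else total
  if _h : digit_1 < 10 ∨ digit_2 < 10 then total
  else digitMatchLoop (PySem.Int.floordiv digit_1 10) (PySem.Int.floordiv digit_2 10) total
termination_by digit_1.toNat
decreasing_by exact pvFloordiv10_toNat_lt digit_1 (by tauto)

def digit_match_alt (digit_1 : Int) (digit_2 : Int) : Int :=
  if digit_1 = 0 ∧ digit_2 = 0 then 1
  else if digit_1 = 0 ∨ digit_2 = 0 then 0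
  else digitMatchLoop digit_1 digit_2 0

-- ===== PRECONDITION & SPEC =====
def Spec_digit_match (digit_1 : Int) (digit_2 : Int) (out : Int) : Prop := out = digit_match_alt digit_1 digit_2
instance (digit_1 : Int) (digit_2 : Int) (out : Int) : Decidable (Spec_digit_match digit_1 digit_2 out) := by unfold Spec_digit_match; infer_instance

-- ===== CLAIM (what is proved, stated in full; the proofs are below) =====
def Claim_equal_digit_match : Prop := ∀ (digit_1 : Int) (digit_2 : Int), Dom_digit_match digit_1 digit_2 → Spec_digit_match digit_1 digit_2 (digit_match digit_1 digit_2)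

-- ===== LEMMAS AND PROOFS =====

-- loop invariant: the accumulator adds up with the recursive count
theorem digitMatchLoop_eq (n : Nat) :
    ∀ (d1 d2 t : Int), d1.toNat ≤ n → ¬ d1 = 0 → ¬ d2 = 0 →
      digitMatchLoop d1 d2 t = t + digit_match d1 d2 := by
  induction n with
  | zero =>
    intro d1 d2 t hle h1 h2
    rw [digitMatchLoop, digit_match]
    have hlt : d1 < 10 := by omega
    simp [h1, h2, hlt]
    split <;> ring
  | succ n ih =>
    intro d1 d2 t hle h1 h2
    rw [digitMatchLoop, digit_match]
    simp only [h1, h2, and_self, or_self, if_false]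
    by_cases hstop : d1 < 10 ∨ d2 < 10
    · simp only [hstop, dif_pos]
      split <;> ring
    · simp only [hstop, dif_neg, not_false_iff]
      have hd1 : ¬ d1 < 10 := by tauto
      have hd2 : ¬ d2 < 10 := by tauto
      have hq1 := pvFloordiv10_toNat_lt d1 hd1
      have hq2 := pvFloordiv10_toNat_lt d2 hd2
      have hp1 := pvFloordiv10_pos d1 hd1
      have hp2 := pvFloordiv10_pos d2 hd2
      have hne1 : ¬ PySem.Int.floordiv d1 10 = 0 := by omega
      have hne2 : ¬ PySem.Int.floordiv d2 10 = 0 := by omega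
      rw [ih _ _ _ (by omega) hne1 hne2]
      split <;> ring

-- ===== VERDICT (by name: the statement is the Claim_ definition above) =====
theorem digit_match_spec : Claim_equal_digit_match := by
  intro d1 d2 _
  unfold Spec_digit_match digit_match_alt
  by_cases h0 : d1 = 0 ∧ d2 = 0
  · rw [digit_match]; simp [h0]
  · by_cases h1 : d1 = 0 ∨ d2 = 0
    · rw [digit_match]; simp [h0, h1]
    · push Not at h1
      rw [if_neg h0, if_neg (by tauto),
        digitMatchLoop_eq d1.toNat d1 d2 0 (le_refl _) h1.1 h1.2]
      ring
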